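-- pv_equiv track=rewrite | github.com/youhebuke1035704078/hermes-desktop-win | src/HermesDesktop/Scripts/discover_hermes.py | choose_table
-- ===== SOURCE A (Python) =====
-- def choose_table(tables, needle):
--     lowered = needle.lower()
--     for t in tables:
--         if t.lower() == lowered:
--             return t
--     for t in tables:
--         if lowered in t.lower():
--             return t
--     return None
-- ===== SOURCE B (Python) =====
-- def choose_table(tables, needle):
--     lowered = needle.lower()
--     candidate = None
--     for t in tables:
--         tl = t.lower()
--         if tl == lowered:
--             return t
--         if candidate is None and lowered in tl:
--             candidate = t
--     return candidate
-- ===== Notes on version B (the rewrite author's own statement) =====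
-- stated objective: simpler
-- what changed: Replaced A's two sequential scans (exact pass, then substring pass) by one single pass that returns an exact match immediately and remembers the first substring match as a candidate returned after the loop.
import Mathlib
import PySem

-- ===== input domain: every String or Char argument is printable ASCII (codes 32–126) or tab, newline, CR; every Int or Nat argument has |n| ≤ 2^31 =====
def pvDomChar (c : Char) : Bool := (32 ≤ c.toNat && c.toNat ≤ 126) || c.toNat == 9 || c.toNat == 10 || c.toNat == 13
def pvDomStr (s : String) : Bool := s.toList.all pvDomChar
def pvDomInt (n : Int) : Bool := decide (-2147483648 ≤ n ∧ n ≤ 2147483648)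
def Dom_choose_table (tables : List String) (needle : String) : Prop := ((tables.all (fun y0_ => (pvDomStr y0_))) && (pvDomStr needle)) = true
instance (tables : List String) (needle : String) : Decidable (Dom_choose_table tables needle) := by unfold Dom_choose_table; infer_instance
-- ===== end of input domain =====

-- ===== PORT A =====
-- A: first loop — return the first table whose lowercase equals `lowered`
def chooseExactLoop : List String → String → Option String
  | [], _ => none
  | t :: ts, lowered =>
    if PySem.Str.lower t == lowered then some t else chooseExactLoop ts lowered

-- A: second loop — return the first table whose lowercase contains `lowered`
def chooseSubLoop : List String → String → Option String
  | [], _ => none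
  | t :: ts, lowered =>
    if PySem.Str.isIn lowered (PySem.Str.lower t) then some t else chooseSubLoop ts lowered

def choose_table (tables : List String) (needle : String) : Option String :=
  let lowered := PySem.Str.lower needle
  match chooseExactLoop tables lowered with
  | some t => some t
  | none => chooseSubLoop tables lowered

-- ===== PORT B =====
-- B: single pass, early return on exact match, first substring match kept as candidate
def chooseGo : List String → String → Option String → Option String
  | [], _, candidate => candidate
  | t :: ts, lowered, candidate =>
    let tl := PySem.Str.lower t
    if tl == lowered then some t
    else
      chooseGo ts lowered
        (if candidate.isNone && PySem.Str.isIn lowered tl then some t else candidate)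

def choose_table_alt (tables : List String) (needle : String) : Option String :=
  chooseGo tables (PySem.Str.lower needle) none

-- ===== PRECONDITION & SPEC =====
def Spec_choose_table (tables : List String) (needle : String) (out : Option String) : Prop := out = choose_table_alt tables needle
instance (tables : List String) (needle : String) (out : Option String) : Decidable (Spec_choose_table tables needle out) := by unfold Spec_choose_table; infer_instance

-- ===== CLAIM (what is proved, stated in full; the proofs are below) =====
def Claim_equal_choose_table : Prop := ∀ (tables : List String) (needle : String), Dom_choose_table tables needle → Spec_choose_table tables needle (choose_table tables needle)

-- ===== LEMMAS AND PROOFS =====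

theorem chooseGo_eq (ts : List String) (lowered : String) (candidate : Option String) :
    chooseGo ts lowered candidate =
      match chooseExactLoop ts lowered with
      | some t => some t
      | none =>
        match candidate with
        | some c => some c
        | none => chooseSubLoop ts lowered := by
  induction ts generalizing candidate with
  | nil => cases candidate <;> simp [chooseGo, chooseExactLoop, chooseSubLoop]
  | cons t ts ih =>
    by_cases h : (PySem.Str.lower t == lowered) = true
    · simp [chooseGo, chooseExactLoop, h]
    · cases candidate with
      | some c =>
        simp only [chooseGo, chooseExactLoop, h, if_neg, Bool.false_eq_true,
          not_false_iff, Option.isNone_some, Bool.false_and]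
        rw [ih]
      | none =>
        by_cases hs : (PySem.Str.isIn lowered (PySem.Str.lower t)) = true
        · simp only [chooseGo, chooseExactLoop, chooseSubLoop, h, hs,
            Option.isNone_none, Bool.true_and, if_true,
            Bool.false_eq_true, if_neg, not_false_iff]
          rw [ih]
        · simp only [chooseGo, chooseExactLoop, chooseSubLoop, h, hs,
            Option.isNone_none, Bool.true_and, Bool.false_eq_true,
            if_neg, not_false_iff]
          rw [ih]

-- ===== VERDICT (by name: the statement is the Claim_ definition above) =====
theorem choose_table_spec : Claim_equal_choose_table := by
  intro tables needle _
  unfold Spec_choose_table choose_table choose_table_alt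
  rw [chooseGo_eq]
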